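-- pv_equiv track=rewrite | github.com/carnival77/Algorithm_Practice | Baekjoon/강의 기초편/시뮬레이션,구현/16935.배열 돌리기 3.py | op5
-- ===== SOURCE A (Python) =====
-- def op5(a):
--     # 5번 연산
--     n=len(a)
--     m=len(a[0])
--     b = list([0] * m for _ in range(n))  # a 모두에 0을 대신 채운 b. m 행 n 열
--     int_n = int(n/2)
--     int_m = int(m/2)
--     for i in range(int_n):
--         for j in range(int_m):
--             # 시계방향으로 1칸씩 이동
--             # 1번 자리 기준으로 수행
--             # 1 -> 2
--             b[i][j+int_m] = a[i][j]
--             # 2 -> 3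
--             b[i+int_n][j+int_m] = a[i][j+int_m]
--             # 3 -> 4
--             b[i+int_n][j] = a[i+int_n][j+int_m]
--             # 4 -> 1
--             b[i][j] = a[i+int_n][j]
--
--     return b
-- ===== SOURCE B (Python) =====
-- def op5(a):
--     # Build the rotated matrix row by row from horizontal slices instead of
--     # scatter-writing individual cells into a zero matrix.
--     n = len(a)
--     m = len(a[0])
--     hn = n // 2
--     hm = m // 2
--     pad = [0] * (m - 2 * hm)
--     b = [a[r + hn][0:hm] + a[r][0:hm] + pad for r in range(hn)]
--     b += [a[r + hn][hm:2 * hm] + a[r][hm:2 * hm] + pad for r in range(hn)]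
--     b += [[0] * m for _ in range(n - 2 * hn)]
--     return b
-- ===== Notes on version B (the rewrite author's own statement) =====
-- stated objective: simpler
-- what changed: B assembles the result row by row from horizontal slices of a (list concatenation per row) instead of A's zero matrix with four scatter-writes per (i,j) cell pair.
import Mathlib
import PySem

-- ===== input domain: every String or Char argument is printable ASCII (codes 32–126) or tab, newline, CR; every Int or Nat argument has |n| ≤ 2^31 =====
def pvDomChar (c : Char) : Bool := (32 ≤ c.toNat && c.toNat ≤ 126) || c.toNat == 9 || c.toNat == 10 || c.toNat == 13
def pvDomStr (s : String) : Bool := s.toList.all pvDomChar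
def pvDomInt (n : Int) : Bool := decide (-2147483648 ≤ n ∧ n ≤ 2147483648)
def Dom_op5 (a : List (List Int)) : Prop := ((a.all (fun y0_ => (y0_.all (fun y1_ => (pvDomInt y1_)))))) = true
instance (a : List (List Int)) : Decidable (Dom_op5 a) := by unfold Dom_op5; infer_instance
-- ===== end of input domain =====

-- B builds the rotated matrix row by row from horizontal slices instead of scatter-writing cells (objective: simpler).

-- a[i][j] for Nat indices; exact for Python's a[i][j] whenever both indices are in range (guaranteed by Pre_op5 at every read site)
def aGet (a : List (List Int)) (i j : Nat) : Int := (a.getD i []).getD j 0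

-- ===== PORT A =====
-- indices are Nat and in range under Pre_op5, so List.set/getD are exact for Python's b[i][j]=v / a[i][j];
-- int(n/2) = n / 2 on Nat since n ≥ 0; a[0] is exact as a.getD 0 [] since Pre_op5 gives a ≠ []
def op5 (a : List (List Int)) : List (List Int) :=
  let n := a.length
  let m := (a.getD 0 []).length
  let b := List.replicate n (List.replicate m (0:Int))
  let hn := n / 2
  let hm := m / 2
  (List.range hn).foldl (fun b i =>
    (List.range hm).foldl (fun b j =>
      let b := b.set i ((b.getD i []).set (j + hm) (aGet a i j))
      let b := b.set (i + hn) ((b.getD (i + hn) []).set (j + hm) (aGet a i (j + hm)))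
      let b := b.set (i + hn) ((b.getD (i + hn) []).set j (aGet a (i + hn) (j + hm)))
      let b := b.set i ((b.getD i []).set j (aGet a (i + hn) j))
      b) b) b

-- ===== PORT B =====
-- slices x[0:hm] / x[hm:2*hm] are exact as take/drop for these Nat bounds (PySem.List.slice_natCast)
def op5_alt (a : List (List Int)) : List (List Int) :=
  let n := a.length
  let m := (a.getD 0 []).length
  let hn := n / 2
  let hm := m / 2
  let pad := List.replicate (m - 2 * hm) (0:Int)
  ((List.range hn).map (fun r => (a.getD (r + hn) []).take hm ++ (a.getD r []).take hm ++ pad))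
  ++ ((List.range hn).map (fun r =>
        ((a.getD (r + hn) []).drop hm).take hm ++ ((a.getD r []).drop hm).take hm ++ pad))
  ++ List.replicate (n - 2 * hn) (List.replicate m 0)

-- ===== PRECONDITION & SPEC =====
-- Exactly the inputs where the Python A returns: a nonempty, and every row among the first
-- 2*(n//2) rows long enough (≥ 2*(m//2)) for A's reads; elsewhere A raises IndexError.
def Pre_op5 (a : List (List Int)) : Prop :=
  a ≠ [] ∧ ∀ row ∈ a.take (2 * (a.length / 2)), 2 * ((a.getD 0 []).length / 2) ≤ row.length
instance (a : List (List Int)) : Decidable (Pre_op5 a) := by unfold Pre_op5; infer_instance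
def pvWitness_op5 : List (List Int) := [[1, 2], [3, 4]]
def Spec_op5 (a : List (List Int)) (out : List (List Int)) : Prop := out = op5_alt a
instance (a : List (List Int)) (out : List (List Int)) : Decidable (Spec_op5 a out) := by unfold Spec_op5; infer_instance

-- ===== CLAIM (what is proved, stated in full; the proofs are below) =====
def Claim_equal_op5 : Prop := ∀ (a : List (List Int)), Dom_op5 a → Pre_op5 a → Spec_op5 a (op5 a)

-- ===== LEMMAS AND PROOFS =====

def eTop (a : List (List Int)) (hn hm : Nat) (r c : Nat) : Int :=
  if c < hm then aGet a (r + hn) c else if c < 2 * hm then aGet a r (c - hm) else 0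

def eBot (a : List (List Int)) (hn hm : Nat) (r c : Nat) : Int :=
  if c < hm then aGet a r (c + hm) else if c < 2 * hm then aGet a (r - hn) c else 0

def rowOf (a : List (List Int)) (hn hm m r : Nat) : List Int :=
  if r < hn then (List.range m).map (eTop a hn hm r)
  else if r < 2 * hn then (List.range m).map (eBot a hn hm r)
  else List.replicate m 0

def canon (a : List (List Int)) (n hn hm m : Nat) : List (List Int) :=
  (List.range n).map (rowOf a hn hm m)

def bodyA (a : List (List Int)) (hn hm i : Nat) (b : List (List Int)) (j : Nat) : List (List Int) :=
  let b := b.set i ((b.getD i []).set (j + hm) (aGet a i j))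
  let b := b.set (i + hn) ((b.getD (i + hn) []).set (j + hm) (aGet a i (j + hm)))
  let b := b.set (i + hn) ((b.getD (i + hn) []).set j (aGet a (i + hn) (j + hm)))
  b.set i ((b.getD i []).set j (aGet a (i + hn) j))

def topF (a : List (List Int)) (hn hm i j c : Nat) : Int :=
  if c < j then aGet a (i + hn) c else if hm ≤ c ∧ c < hm + j then aGet a i (c - hm) else 0

def botF (a : List (List Int)) (hn hm i j c : Nat) : Int :=
  if c < j then aGet a (i + hn) (c + hm) else if hm ≤ c ∧ c < hm + j then aGet a i c else 0

lemma op5_eq (a : List (List Int)) :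
    op5 a = (List.range (a.length / 2)).foldl
      (fun b i => (List.range ((a.getD 0 []).length / 2)).foldl
        (bodyA a (a.length / 2) ((a.getD 0 []).length / 2) i) b)
      (List.replicate a.length (List.replicate (a.getD 0 []).length 0)) := rfl

lemma set_map_range {α : Type} (f : Nat → α) (m k : Nat) (v : α) (hk : k < m) :
    ((List.range m).map f).set k v = (List.range m).map (fun c => if c = k then v else f c) := by
  apply List.ext_getElem
  · simp
  · intro c h1 h2
    simp only [List.getElem_set, List.getElem_map, List.getElem_range]
    rcases eq_or_ne k c with h | h
    · subst h; simp
    · rw [if_neg h, if_neg (Ne.symm h)]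

lemma map_topF_zero (a : List (List Int)) (hn hm i m : Nat) :
    (List.range m).map (topF a hn hm i 0) = List.replicate m 0 := by
  apply List.ext_getElem
  · simp
  · intro c h1 h2
    simp only [List.getElem_map, List.getElem_range, List.getElem_replicate]
    unfold topF
    rw [if_neg (by omega), if_neg (by omega)]

lemma map_botF_zero (a : List (List Int)) (hn hm i m : Nat) :
    (List.range m).map (botF a hn hm i 0) = List.replicate m 0 := by
  apply List.ext_getElem
  · simp
  · intro c h1 h2
    simp only [List.getElem_map, List.getElem_range, List.getElem_replicate]
    unfold botF
    rw [if_neg (by omega), if_neg (by omega)]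

lemma top_step (a : List (List Int)) (hn hm i j m : Nat) (hjm : j < hm) (h2m : 2 * hm ≤ m) :
    (((List.range m).map (topF a hn hm i j)).set (j + hm) (aGet a i j)).set j (aGet a (i + hn) j)
      = (List.range m).map (topF a hn hm i (j + 1)) := by
  rw [set_map_range _ _ _ _ (by omega), set_map_range _ _ _ _ (by omega)]
  apply List.map_congr_left
  intro c hc
  rw [List.mem_range] at hc
  unfold topF
  rcases eq_or_ne c j with h1 | h1
  · subst h1; rw [if_pos rfl, if_pos (by omega)]
  · rw [if_neg h1]
    rcases eq_or_ne c (j + hm) with h2 | h2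
    · subst h2
      rw [if_pos rfl, if_neg (by omega), if_pos (by omega), Nat.add_sub_cancel]
    · rw [if_neg h2]
      split_ifs <;> first | rfl | (exfalso; omega)

lemma bot_step (a : List (List Int)) (hn hm i j m : Nat) (hjm : j < hm) (h2m : 2 * hm ≤ m) :
    (((List.range m).map (botF a hn hm i j)).set (j + hm) (aGet a i (j + hm))).set j
        (aGet a (i + hn) (j + hm))
      = (List.range m).map (botF a hn hm i (j + 1)) := by
  rw [set_map_range _ _ _ _ (by omega), set_map_range _ _ _ _ (by omega)]
  apply List.map_congr_left
  intro c hc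
  rw [List.mem_range] at hc
  unfold botF
  rcases eq_or_ne c j with h1 | h1
  · subst h1; rw [if_pos rfl, if_pos (by omega)]
  · rw [if_neg h1]
    rcases eq_or_ne c (j + hm) with h2 | h2
    · subst h2
      rw [if_pos rfl, if_neg (by omega), if_pos (by omega)]
    · rw [if_neg h2]
      split_ifs <;> first | rfl | (exfalso; omega)

lemma inner_char (a : List (List Int)) (hn hm i m : Nat) (hi : i < hn) (h2m : 2 * hm ≤ m)
    (j : Nat) (hj : j ≤ hm) (b : List (List Int))
    (hbi : b[i]? = some (List.replicate m 0))
    (hbi' : b[i + hn]? = some (List.replicate m 0)) :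
    ((List.range j).foldl (bodyA a hn hm i) b).length = b.length ∧
    ((List.range j).foldl (bodyA a hn hm i) b)[i]? = some ((List.range m).map (topF a hn hm i j)) ∧
    ((List.range j).foldl (bodyA a hn hm i) b)[i + hn]? =
      some ((List.range m).map (botF a hn hm i j)) ∧
    ∀ r, r ≠ i → r ≠ i + hn → ((List.range j).foldl (bodyA a hn hm i) b)[r]? = b[r]? := by
  induction j with
  | zero =>
    refine ⟨rfl, ?_, ?_, fun r _ _ => rfl⟩
    · rw [map_topF_zero]; exact hbi
    · rw [map_botF_zero]; exact hbi'
  | succ j ih =>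
    have hjm : j < hm := by omega
    obtain ⟨hlen, hti, hti', hoth⟩ := ih (by omega)
    have hne : i ≠ i + hn := by omega
    have hne' : i + hn ≠ i := by omega
    set B := (List.range j).foldl (bodyA a hn hm i) b with hBdef
    obtain ⟨hiB, _⟩ := List.getElem?_eq_some_iff.mp hti
    obtain ⟨hiB', _⟩ := List.getElem?_eq_some_iff.mp hti'
    simp only [List.range_succ, List.foldl_append, List.foldl_cons, List.foldl_nil, ← hBdef]
    simp only [bodyA]
    have e1 : B.getD i [] = (List.range m).map (topF a hn hm i j) := by
      rw [List.getD_eq_getElem?_getD, hti]; rfl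
    rw [e1]
    have e2 : (B.set i (((List.range m).map (topF a hn hm i j)).set (j + hm)
          (aGet a i j))).getD (i + hn) [] = (List.range m).map (botF a hn hm i j) := by
      rw [List.getD_eq_getElem?_getD, List.getElem?_set_ne hne, hti']; rfl
    rw [e2]
    have e3 : ((B.set i (((List.range m).map (topF a hn hm i j)).set (j + hm) (aGet a i j))).set
          (i + hn) (((List.range m).map (botF a hn hm i j)).set (j + hm)
            (aGet a i (j + hm)))).getD (i + hn) []
        = ((List.range m).map (botF a hn hm i j)).set (j + hm) (aGet a i (j + hm)) := by
      rw [List.getD_eq_getElem?_getD, List.getElem?_set_self (by simpa using hiB')]; rfl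
    rw [e3]
    have e4 : (((B.set i (((List.range m).map (topF a hn hm i j)).set (j + hm) (aGet a i j))).set
          (i + hn) (((List.range m).map (botF a hn hm i j)).set (j + hm)
            (aGet a i (j + hm)))).set (i + hn)
          ((((List.range m).map (botF a hn hm i j)).set (j + hm) (aGet a i (j + hm))).set j
            (aGet a (i + hn) (j + hm)))).getD i []
        = ((List.range m).map (topF a hn hm i j)).set (j + hm) (aGet a i j) := by
      rw [List.getD_eq_getElem?_getD, List.getElem?_set_ne hne', List.getElem?_set_ne hne',
        List.getElem?_set_self (by simpa using hiB)]; rfl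
    rw [e4]
    refine ⟨?_, ?_, ?_, ?_⟩
    · simp only [List.length_set]; exact hlen
    · rw [List.getElem?_set_self (by simpa using hiB),
        top_step a hn hm i j m hjm h2m]
    · rw [List.getElem?_set_ne hne, List.getElem?_set_self (by simpa using hiB'),
        bot_step a hn hm i j m hjm h2m]
    · intro r hr1 hr2
      rw [List.getElem?_set_ne (Ne.symm hr1), List.getElem?_set_ne (Ne.symm hr2),
        List.getElem?_set_ne (Ne.symm hr2), List.getElem?_set_ne (Ne.symm hr1)]
      exact hoth r hr1 hr2

lemma topF_hm_eq (a : List (List Int)) (hn hm i m : Nat) :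
    (List.range m).map (topF a hn hm i hm) = (List.range m).map (eTop a hn hm i) := by
  apply List.map_congr_left
  intro c hc
  unfold topF eTop
  split_ifs <;> first | rfl | (exfalso; omega)

lemma botF_hm_eq (a : List (List Int)) (hn hm k m : Nat) :
    (List.range m).map (botF a hn hm k hm) = (List.range m).map (eBot a hn hm (k + hn)) := by
  apply List.map_congr_left
  intro c hc
  unfold botF eBot
  rw [Nat.add_sub_cancel]
  split_ifs <;> first | rfl | (exfalso; omega)

lemma outer_char (a : List (List Int)) (n m hn hm : Nat)
    (hn2 : 2 * hn ≤ n) (h2m : 2 * hm ≤ m) (k : Nat) (hk : k ≤ hn) :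
    ((List.range k).foldl (fun b i => (List.range hm).foldl (bodyA a hn hm i) b)
        (List.replicate n (List.replicate m (0:Int)))).length = n ∧
    ∀ r, ((List.range k).foldl (fun b i => (List.range hm).foldl (bodyA a hn hm i) b)
        (List.replicate n (List.replicate m (0:Int))))[r]? =
      (if r < k then some ((List.range m).map (eTop a hn hm r))
       else if hn ≤ r ∧ r < hn + k then some ((List.range m).map (eBot a hn hm r))
       else (List.replicate n (List.replicate m (0:Int)))[r]?) := by
  induction k with
  | zero =>
    simp only [List.range_zero, List.foldl_nil]
    exact ⟨by simp, fun r => by rw [if_neg (by omega), if_neg (by omega)]⟩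
  | succ k ihk =>
    have hkn : k < hn := by omega
    obtain ⟨ihlen, ihr⟩ := ihk (by omega)
    set B := (List.range k).foldl (fun b i => (List.range hm).foldl (bodyA a hn hm i) b)
      (List.replicate n (List.replicate m (0:Int))) with hBdef
    simp only [List.range_succ, List.foldl_append, List.foldl_cons, List.foldl_nil, ← hBdef]
    have hbk : B[k]? = some (List.replicate m 0) := by
      rw [ihr k, if_neg (by omega), if_neg (by omega), List.getElem?_replicate,
        if_pos (by omega)]
    have hbk' : B[k + hn]? = some (List.replicate m 0) := by
      rw [ihr (k + hn), if_neg (by omega), if_neg (by omega), List.getElem?_replicate,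
        if_pos (by omega)]
    obtain ⟨l1, t1, t2, t3⟩ := inner_char a hn hm k m hkn h2m hm (le_refl hm) B hbk hbk'
    refine ⟨by rw [l1, ihlen], ?_⟩
    intro r
    rcases eq_or_ne r k with hr1 | hr1
    · subst hr1
      rw [t1, topF_hm_eq a hn hm r m, if_pos (by omega)]
    · rcases eq_or_ne r (k + hn) with hr2 | hr2
      · subst hr2
        rw [t2, botF_hm_eq a hn hm k m, if_neg (by omega), if_pos (by omega)]
      · rw [t3 r hr1 hr2, ihr r]
        split_ifs <;> first | rfl | (exfalso; omega)

lemma op5_eq_canon (a : List (List Int)) :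
    op5 a = canon a a.length (a.length / 2) ((a.getD 0 []).length / 2)
      ((a.getD 0 []).length) := by
  rw [op5_eq]
  obtain ⟨hl, hr⟩ := outer_char a a.length ((a.getD 0 []).length) (a.length / 2)
    ((a.getD 0 []).length / 2) (by omega) (by omega) (a.length / 2) (le_refl _)
  apply List.ext_getElem?
  intro r
  rw [hr r]
  unfold canon
  rw [List.getElem?_map]
  by_cases h : r < a.length
  · rw [List.getElem?_range h]
    simp only [Option.map_some]
    unfold rowOf
    split_ifs <;>
      first
      | rfl
      | (exfalso; omega)
      | (rw [List.getElem?_replicate, if_pos h])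
  · have hnone : (List.range a.length)[r]? = none := by
      rw [List.getElem?_eq_none] <;> simp <;> omega
    rw [hnone]
    rw [if_neg (by omega), if_neg (by omega), List.getElem?_replicate, if_neg (by omega)]
    rfl

lemma top_row (a : List (List Int)) (hn hm m r : Nat)
    (h1 : 2 * hm ≤ (a.getD (r + hn) []).length) (h2 : 2 * hm ≤ (a.getD r []).length)
    (h2m : 2 * hm ≤ m) :
    (a.getD (r + hn) []).take hm ++ (a.getD r []).take hm ++ List.replicate (m - 2 * hm) (0:Int)
      = (List.range m).map (eTop a hn hm r) := by
  apply List.ext_getElem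
  · simp only [List.length_append, List.length_take, List.length_replicate, List.length_map,
      List.length_range]
    omega
  · intro c hc1 hc2
    simp only [List.getElem_append, List.getElem_take, List.getElem_map, List.getElem_range,
      List.getElem_replicate, List.length_append, List.length_take, List.length_replicate,
      Nat.min_eq_left (by omega : hm ≤ (a.getD (r + hn) []).length),
      Nat.min_eq_left (by omega : hm ≤ (a.getD r []).length)]
    unfold eTop
    split_ifs <;>
      first
      | rfl
      | (exfalso; omega)
      | (unfold aGet; exact (List.getD_eq_getElem _ _ (by omega)).symm)

lemma bot_row (a : List (List Int)) (hn hm m r : Nat)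
    (h1 : 2 * hm ≤ (a.getD (r + hn) []).length) (h2 : 2 * hm ≤ (a.getD r []).length)
    (h2m : 2 * hm ≤ m) :
    ((a.getD (r + hn) []).drop hm).take hm ++ ((a.getD r []).drop hm).take hm
        ++ List.replicate (m - 2 * hm) (0:Int)
      = (List.range m).map (fun c =>
          if c < hm then aGet a (r + hn) (hm + c) else if c < 2 * hm then aGet a r (hm + (c - hm))
          else 0) := by
  apply List.ext_getElem
  · simp only [List.length_append, List.length_take, List.length_drop, List.length_replicate,
      List.length_map, List.length_range]
    omega
  · intro c hc1 hc2
    simp only [List.getElem_append, List.getElem_take, List.getElem_drop, List.getElem_map,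
      List.getElem_range, List.getElem_replicate, List.length_append, List.length_take,
      List.length_drop, List.length_replicate,
      Nat.min_eq_left (by omega : hm ≤ (a.getD (r + hn) []).length - hm),
      Nat.min_eq_left (by omega : hm ≤ (a.getD r []).length - hm)]
    split_ifs <;>
      first
      | rfl
      | (exfalso; omega)
      | (unfold aGet; exact (List.getD_eq_getElem _ _ (by omega)).symm)

lemma alt_eq_canon (a : List (List Int)) (h : Pre_op5 a) :
    op5_alt a = canon a a.length (a.length / 2) ((a.getD 0 []).length / 2)
      ((a.getD 0 []).length) := by
  obtain ⟨hne, hrows⟩ := h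
  have hrow : ∀ r, r < 2 * (a.length / 2) →
      2 * ((a.getD 0 []).length / 2) ≤ (a.getD r []).length := by
    intro r hr
    have hrn : r < a.length := by omega
    have hmem : a[r] ∈ a.take (2 * (a.length / 2)) := by
      have hlt : r < (a.take (2 * (a.length / 2))).length := by simp; omega
      have hg := List.getElem_mem hlt
      rwa [List.getElem_take] at hg
    have hx := hrows _ hmem
    rwa [List.getD_eq_getElem a [] hrn]
  simp only [op5_alt, canon]
  apply List.ext_getElem
  · simp; omega
  · intro r h1 h2
    rw [List.getElem_map, List.getElem_range]
    have hrn : r < a.length := by simpa using h2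
    unfold rowOf
    by_cases c1 : r < a.length / 2
    · rw [List.getElem_append_left (by simp; omega), List.getElem_append_left (by simp; omega),
        List.getElem_map, List.getElem_range, if_pos c1]
      exact top_row a (a.length / 2) ((a.getD 0 []).length / 2) ((a.getD 0 []).length) r
        (hrow _ (by omega)) (hrow _ (by omega)) (by omega)
    · by_cases c2 : r < 2 * (a.length / 2)
      · rw [List.getElem_append_left (by simp; omega), List.getElem_append_right (by simp; omega)]
        simp only [List.length_map, List.length_range]
        rw [List.getElem_map, List.getElem_range,
          bot_row a (a.length / 2) ((a.getD 0 []).length / 2) ((a.getD 0 []).length)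
            (r - a.length / 2)
            (by have := hrow (r - a.length / 2 + a.length / 2) (by omega); exact this)
            (hrow _ (by omega)) (by omega),
          if_neg c1, if_pos c2]
        apply List.map_congr_left
        intro c hc
        rw [List.mem_range] at hc
        unfold eBot
        simp only [show r - a.length / 2 + a.length / 2 = r from by omega]
        split_ifs <;> first | rfl | (exfalso; omega) | (congr 1; omega)
      · rw [List.getElem_append_right (by simp; omega)]
        simp only [List.length_append, List.length_map, List.length_range]
        rw [List.getElem_replicate, if_neg c1, if_neg c2]

-- ===== VERDICT (by name: the statement is the Claim_ definition above) =====
theorem op5_spec : Claim_equal_op5 := by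
  intro a _ pre
  unfold Spec_op5
  rw [op5_eq_canon, alt_eq_canon a pre]
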